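-- pv_equiv track=rewrite | github.com/Albertree/SOAR-ARC-test | procedural_memory/base_rules/_primitives.py | staircase_grow
-- ===== SOURCE A (Python) =====
-- def staircase_grow(grid):
--     """Expand a 1-row grid with colored prefix into a growing staircase.
--     Input: 1 row with K colored cells followed by zeros, width W.
--     Output: W/2 rows where row i has (K+i) colored cells."""
--     if len(grid) != 1:
--         return None
--     row = grid[0]
--     w = len(row)
--     bg = 0
--     # Find colored prefix length and color
--     k = 0
--     color = None
--     for c in row:
--         if c != bg:
--             k += 1
--             color = c
--         else:
--             break
--     if k == 0 or color is None:
--         return None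
--     num_rows = w // 2
--     output = []
--     for i in range(num_rows):
--         new_row = [bg] * w
--         for j in range(k + i):
--             if j < w:
--                 new_row[j] = color
--         output.append(new_row)
--     return output
-- ===== SOURCE B (Python) =====
-- def staircase_grow(grid):
--     """Expand a 1-row grid with colored prefix into a growing staircase.
--     Incremental: maintain one running row and color its first zero cell
--     (if any) on each step, appending a copy per output row."""
--     if len(grid) != 1:
--         return None
--     row = grid[0]
--     w = len(row)
--     k = 0
--     while k < w and row[k] != 0:
--         k += 1
--     if k == 0:
--         return None
--     color = row[k - 1]
--     cur = [color] * k + [0] * (w - k)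
--     out = []
--     for _ in range(w // 2):
--         out.append(cur)
--         nxt = list(cur)
--         for j, x in enumerate(nxt):
--             if x == 0:
--                 nxt[j] = color
--                 break
--         cur = nxt
--     return out
-- ===== Notes on version B (the rewrite author's own statement) =====
-- stated objective: alternative
-- what changed: B replaces A's per-row reconstruction (each row rebuilt from scratch with an inner loop over range(k+i)) by an incremental scan that keeps one running row across iterations and colors only its first zero cell per step, appending a copy each time.
import Mathlib
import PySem

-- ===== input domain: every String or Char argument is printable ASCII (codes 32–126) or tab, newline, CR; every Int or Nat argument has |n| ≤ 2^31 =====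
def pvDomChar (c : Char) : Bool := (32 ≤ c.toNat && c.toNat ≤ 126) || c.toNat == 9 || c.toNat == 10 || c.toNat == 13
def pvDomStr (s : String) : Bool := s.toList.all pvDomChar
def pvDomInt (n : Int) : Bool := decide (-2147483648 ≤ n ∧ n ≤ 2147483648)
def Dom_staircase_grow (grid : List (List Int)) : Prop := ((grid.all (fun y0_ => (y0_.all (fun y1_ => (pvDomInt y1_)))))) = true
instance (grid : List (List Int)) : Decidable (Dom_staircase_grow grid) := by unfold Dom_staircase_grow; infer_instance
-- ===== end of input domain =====

-- B keeps one running row across iterations and colors only its first zero cell per step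
-- (appending a copy each time), instead of A's rebuilding every row from scratch; objective: alternative.

-- ===== PORT A =====
-- the 'for c in row: … break' loop of A, carrying (k, color)
def pvPrefixA : List Int → Int × Option Int → Int × Option Int
  | [], st => st
  | c :: rest, (k, color) => if c ≠ 0 then pvPrefixA rest (k + 1, some c) else (k, color)

def staircase_grow (grid : List (List Int)) : Option (List (List Int)) :=
  if grid.length = 1 then
    match grid with
    | row :: _ =>
      let w : Int := (row.length : Int)
      let st := pvPrefixA row (0, none)
      if st.1 = 0 ∨ st.2 = none then none
      else
        let numRows := PySem.Int.floordiv w 2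
        some ((PySem.List.pyRange 0 numRows 1).map (fun i =>
          (PySem.List.pyRange 0 (st.1 + i) 1).foldl
            (fun r j => if j < w then r.set j.toNat (st.2.getD 0) else r)
            (List.replicate w.toNat 0)))
    | [] => none
  else none

-- ===== PORT B =====
-- B's 'while k < w and row[k] != 0: k += 1'
def pvPrefLen : List Int → Nat
  | [] => 0
  | x :: rest => if x ≠ 0 then 1 + pvPrefLen rest else 0

-- B's inner 'for j, x in enumerate(nxt): if x == 0: nxt[j] = color; break'
-- (copy-then-set-first-zero, written as a structural rebuild of the list)
def pvStepRow : List Int → Int → List Int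
  | [], _ => []
  | x :: rest, c => if x = 0 then c :: rest else x :: pvStepRow rest c

-- B's 'for _ in range(w // 2): out.append(cur); cur = nxt' loop as recursion on the count
def pvBuildRows : Nat → List Int → Int → List (List Int)
  | 0, _, _ => []
  | n + 1, cur, c => cur :: pvBuildRows n (pvStepRow cur c) c

def staircase_grow_alt (grid : List (List Int)) : Option (List (List Int)) :=
  match grid with
  | [row] =>
    let w := row.length
    let k := pvPrefLen row
    if k = 0 then none
    else
      let color := row.getD (k - 1) 0
      some (pvBuildRows (w / 2) (List.replicate k color ++ List.replicate (w - k) 0) color)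
  | _ => none

-- ===== PRECONDITION & SPEC =====
def Spec_staircase_grow (grid : List (List Int)) (out : Option (List (List Int))) : Prop := out = staircase_grow_alt grid
instance (grid : List (List Int)) (out : Option (List (List Int))) : Decidable (Spec_staircase_grow grid out) := by unfold Spec_staircase_grow; infer_instance

-- ===== CLAIM (what is proved, stated in full; the proofs are below) =====
def Claim_equal_staircase_grow : Prop := ∀ (grid : List (List Int)), Dom_staircase_grow grid → Spec_staircase_grow grid (staircase_grow grid)

-- ===== LEMMAS AND PROOFS =====

theorem pvPrefixA_eq (l : List Int) (k0 : Int) (c0 : Option Int) :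
    pvPrefixA l (k0, c0) =
      (k0 + ((l.takeWhile (fun c => c != 0)).length : Int),
       ((l.takeWhile (fun c => c != 0)).getLast?).or c0) := by
  induction l generalizing k0 c0 with
  | nil => simp [pvPrefixA]
  | cons c rest ih =>
    by_cases hc : c = 0
    · rw [pvPrefixA, if_neg (by simp [hc]),
        List.takeWhile_cons_of_neg (by simp [hc])]
      simp
    · have ht : List.takeWhile (fun c : Int => c != 0) (c :: rest) =
          c :: List.takeWhile (fun c : Int => c != 0) rest := by
        simp [hc]
      rw [pvPrefixA, if_pos hc, ih, ht]
      refine Prod.ext ?_ ?_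
      · show k0 + 1 + _ = k0 + _
        simp only [List.length_cons]
        push_cast; ring
      · show _ = ((c :: _).getLast?).or c0
        rw [List.getLast?_cons]
        cases h : (rest.takeWhile (fun c => c != 0)).getLast? with
        | none => simp
        | some a => simp [h]

theorem pvPrefLen_eq_takeWhile_len (l : List Int) :
    pvPrefLen l = (l.takeWhile (fun c => c != 0)).length := by
  induction l with
  | nil => simp [pvPrefLen]
  | cons c rest ih =>
    by_cases hc : c = 0
    · rw [pvPrefLen, if_neg (by simp [hc]), List.takeWhile_cons_of_neg (by simp [hc])]
      simp
    · have ht : List.takeWhile (fun c : Int => c != 0) (c :: rest) =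
          c :: List.takeWhile (fun c : Int => c != 0) rest := by
        simp [hc]
      rw [pvPrefLen, if_pos hc, ht]
      simp [ih]; omega

theorem getLast?_takeWhile (l : List Int) (p : Int → Bool)
    (h : (l.takeWhile p).length ≠ 0) :
    (l.takeWhile p).getLast? = l[(l.takeWhile p).length - 1]? := by
  induction l with
  | nil => simp at h
  | cons a rest ih =>
    by_cases ha : p a
    · rw [List.takeWhile_cons_of_pos ha] at h ⊢
      cases hr : (rest.takeWhile p).length with
      | zero =>
        have : rest.takeWhile p = [] := List.length_eq_zero_iff.mp hr
        simp [this]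
      | succ n =>
        have hne : (rest.takeWhile p).length ≠ 0 := by omega
        have hlt : (rest.takeWhile p).length - 1 < rest.length := by
          have := (List.takeWhile_sublist (p := p) (l := rest)).length_le
          omega
        have h1 : rest[(rest.takeWhile p).length - 1]? =
            some (rest[(rest.takeWhile p).length - 1]'hlt) := List.getElem?_eq_getElem hlt
        rw [List.getLast?_cons, ih hne, h1]
        simp only [Option.getD_some]
        have h2 : (a :: rest.takeWhile p).length - 1 =
            ((rest.takeWhile p).length - 1) + 1 := by
          simp only [List.length_cons, hr]
          omega
        rw [h2, List.getElem?_cons_succ, h1]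
    · rw [List.takeWhile_cons_of_neg ha] at h; simp at h

-- A's inner-row fold over range setting cells = closed-form row
theorem row_fold_eq (m w : Nat) (color : Int) :
    ((List.range m).foldl
      (fun (r : List Int) (j : Nat) => if (j : Int) < (w : Int) then r.set j color else r)
      (List.replicate w 0)) =
    List.replicate (min m w) color ++ List.replicate (w - min m w) 0 := by
  induction m with
  | zero => simp
  | succ n ih =>
    rw [List.range_succ, List.foldl_append, ih]
    simp only [List.foldl_cons, List.foldl_nil]
    by_cases hn : n < w
    · rw [if_pos (by exact_mod_cast hn)]
      have hmin : min n w = n := by omega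
      have hmin' : min (n + 1) w = n + 1 := by omega
      rw [hmin, hmin']
      have hset : (List.replicate n color ++ List.replicate (w - n) (0 : Int)).set n color =
          List.replicate n color ++ (List.replicate (w - n) (0 : Int)).set 0 color := by
        have := List.set_append_right (s := List.replicate n color)
          (t := List.replicate (w - n) (0 : Int)) (x := color) (i := n) (by simp)
        simpa using this
      rw [hset]
      have hrep : List.replicate (w - n) (0 : Int) = 0 :: List.replicate (w - n - 1) 0 := by
        have h3 : w - n = (w - n - 1) + 1 := by omega
        conv_lhs => rw [h3]
        rw [List.replicate_succ]
      rw [hrep]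
      have h4 : w - (n + 1) = w - n - 1 := by omega
      rw [h4, List.replicate_succ' (n := n) (a := color), List.append_assoc]
      simp
    · rw [if_neg (by exact_mod_cast hn)]
      have : min (n + 1) w = min n w := by omega
      rw [this]

-- B's step on a staircase row advances the staircase by one (needs color ≠ 0)
theorem pvStepRow_staircase (c : Int) (hc : c ≠ 0) (m r : Nat) :
    pvStepRow (List.replicate m c ++ List.replicate r 0) c =
      (if r = 0 then List.replicate m c
       else List.replicate (m + 1) c ++ List.replicate (r - 1) 0) := by
  induction m with
  | zero =>
    cases r with
    | zero => simp [pvStepRow]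
    | succ r' => simp [pvStepRow, List.replicate_succ]
  | succ n ih =>
    rw [List.replicate_succ, List.cons_append, pvStepRow, if_neg hc, ih]
    cases r with
    | zero => simp [List.replicate_succ]
    | succ r' =>
      simp only [Nat.succ_ne_zero, if_neg, reduceIte]
      rw [List.replicate_succ (n := n + 1), List.cons_append]

theorem pvStepRow_min (c : Int) (hc : c ≠ 0) (m w : Nat) :
    pvStepRow (List.replicate (min m w) c ++ List.replicate (w - min m w) 0) c =
      List.replicate (min (m + 1) w) c ++ List.replicate (w - min (m + 1) w) 0 := by
  rw [pvStepRow_staircase c hc]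
  by_cases h : w ≤ m
  · have h1 : w - min m w = 0 := by omega
    have h2 : min m w = w := by omega
    have h3 : min (m + 1) w = w := by omega
    simp [h1, h2, h3]
  · have h1 : w - min m w ≠ 0 := by omega
    have h2 : min m w + 1 = min (m + 1) w := by omega
    have h3 : w - min m w - 1 = w - min (m + 1) w := by omega
    rw [if_neg h1, h2, h3]

-- B's incremental loop produces the closed-form staircase rows
theorem pvBuildRows_eq (c : Int) (hc : c ≠ 0) (w : Nat) :
    ∀ (n m : Nat),
      pvBuildRows n (List.replicate (min m w) c ++ List.replicate (w - min m w) 0) c =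
        (List.range n).map
          (fun i => List.replicate (min (m + i) w) c ++ List.replicate (w - min (m + i) w) 0) := by
  intro n
  induction n with
  | zero => intro m; simp [pvBuildRows]
  | succ n ih =>
    intro m
    rw [pvBuildRows, pvStepRow_min c hc, ih (m + 1), List.range_succ_eq_map, List.map_cons,
      List.map_map]
    simp only [Nat.add_zero]
    congr 1
    apply List.map_congr_left
    intro i _
    simp only [Function.comp]
    have : m + 1 + i = m + (i + 1) := by omega
    rw [this]

theorem staircase_grow_eq (grid : List (List Int)) :
    staircase_grow grid = staircase_grow_alt grid := by
  match grid with
  | [] => rfl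
  | _ :: _ :: _ => rfl
  | [row] =>
    rw [staircase_grow, staircase_grow_alt]
    simp only [List.length_singleton]
    rw [if_pos trivial, pvPrefixA_eq]
    set t := row.takeWhile (fun c => c != 0) with ht
    have hk : pvPrefLen row = t.length := pvPrefLen_eq_takeWhile_len row
    by_cases h0 : t.length = 0
    · have : t = [] := List.length_eq_zero_iff.mp h0
      simp [this, hk, h0]
    · have hlast : t.getLast? = row[t.length - 1]? := getLast?_takeWhile row _ h0
      have hle := (List.takeWhile_sublist (p := fun c : Int => c != 0) (l := row)).length_le
      rw [← ht] at hle
      have hlt : t.length - 1 < row.length := by omega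
      have hsome : row[t.length - 1]? = some (row[t.length - 1]'hlt) :=
        List.getElem?_eq_getElem hlt
      have hcolne : t.getLast?.or none ≠ none := by
        rw [hlast, hsome]; simp [Option.or]
      have hfst : (0 : Int) + (t.length : Int) ≠ 0 := by omega
      rw [if_neg (not_or.mpr ⟨hfst, hcolne⟩), hk, if_neg h0]
      -- the two color expressions agree, and the color is nonzero
      have hcol : (t.getLast?.or none).getD 0 = row.getD (t.length - 1) 0 := by
        rw [hlast, hsome]; simp [Option.or, List.getD_eq_getElem?_getD, hsome]
      have hcne : row.getD (t.length - 1) 0 ≠ 0 := by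
        have hmem : row[t.length - 1]'hlt ∈ t := by
          have : t.getLast? = some (row[t.length - 1]'hlt) := by rw [hlast, hsome]
          exact List.mem_of_getLast? this
        have hp := List.mem_takeWhile_imp (by rw [← ht]; exact hmem)
        simp only [bne_iff_ne, ne_eq] at hp
        simpa [List.getD_eq_getElem?_getD, hsome] using hp
      congr 1
      -- A side: reduce to the closed-form map
      have hnum : PySem.Int.floordiv (row.length : Int) 2 = ((row.length / 2 : Nat) : Int) := by
        exact_mod_cast PySem.Int.floordiv_natCast row.length 2
      rw [hnum, PySem.List.pyRange_one]
      have : (((row.length / 2 : Nat) : Int) - 0).toNat = row.length / 2 := by omega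
      rw [this, List.map_map]
      -- B side: incremental loop = closed-form map (start at m = t.length ≤ w)
      have hinit : List.replicate t.length (row.getD (t.length - 1) 0) ++
          List.replicate (row.length - t.length) 0 =
          List.replicate (min t.length row.length) (row.getD (t.length - 1) 0) ++
          List.replicate (row.length - min t.length row.length) 0 := by
        rw [min_eq_left hle]
      rw [hinit, pvBuildRows_eq _ hcne]
      apply List.map_congr_left
      intro i hi
      simp only [Function.comp]
      have hki : ((0 : Int) + (t.length : Int) + (0 + (i : Int))) = ((t.length + i : Nat) : Int) := by
        push_cast; ring
      rw [hki, PySem.List.pyRange_one]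
      have h2 : (((t.length + i : Nat) : Int) - 0).toNat = t.length + i := by omega
      rw [h2, List.foldl_map]
      simp only [zero_add, Int.toNat_natCast]
      rw [row_fold_eq, hcol]

-- ===== VERDICT (by name: the statement is the Claim_ definition above) =====
theorem staircase_grow_spec : Claim_equal_staircase_grow := by
  intro grid _
  exact staircase_grow_eq grid
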